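-- pv_equiv track=rewrite | github.com/mabergerx/codesignal | arcade/darkWilderness/digitDegree.py | solution
-- ===== SOURCE A (Python) =====
-- def solution(n):
--
--     if n < 10:
--         return 0
--
--     count = 0
--
--     def recursively_solve(number, count=count):
--         count += 1
--         string_representation = str(number)
--         sum_digits = sum([int(digit) for digit in string_representation])
--         if sum_digits > 9:
--             return recursively_solve(sum_digits, count)
--         else:
--             return count
--
--     return recursively_solve(n)
-- ===== SOURCE B (Python) =====
-- def solution(n):
--     count = 0
--     while n >= 10:
--         n = sum(int(d) for d in str(n))
--         count += 1
--     return count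
-- ===== Notes on version B (the rewrite author's own statement) =====
-- stated objective: simpler
-- what changed: Replaced the nested recursive helper threading a count accumulator with a flat iterative while loop that re-binds n to its digit sum and increments count until n is a single digit.
import Mathlib
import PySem

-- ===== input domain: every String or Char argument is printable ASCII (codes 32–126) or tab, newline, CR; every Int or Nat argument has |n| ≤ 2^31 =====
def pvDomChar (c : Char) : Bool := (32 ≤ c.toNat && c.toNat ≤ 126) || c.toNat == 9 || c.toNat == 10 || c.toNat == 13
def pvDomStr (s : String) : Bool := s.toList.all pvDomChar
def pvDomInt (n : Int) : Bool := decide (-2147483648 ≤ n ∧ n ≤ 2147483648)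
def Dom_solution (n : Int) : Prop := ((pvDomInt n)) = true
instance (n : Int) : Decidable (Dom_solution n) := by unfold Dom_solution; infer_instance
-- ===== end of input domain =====

-- B replaces A's nested recursive helper (count accumulator) with a flat iterative while loop.
-- ===== PORT A =====
-- sum([int(digit) for digit in str(number)]); exact here: the helper is only ever called
-- with number >= 10, and digit sums are positive, so every char of str(number) is a digit.
def pvDigitSum (number : Int) : Int :=
  ((PySem.Int.toChars number).map (fun d => (PySem.Int.ofChars? [d]).getD 0)).sum

-- recursively_solve(number, count); fuel is only a termination guard (unreachable for
-- admitted inputs, since the digit sum of number >= 10 is strictly smaller than number)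
def pvRecSolveA (fuel : Nat) (number count : Int) : Int :=
  match fuel with
  | 0 => count
  | fuel + 1 =>
    let count := count + 1
    let sum_digits := pvDigitSum number
    if sum_digits > 9 then pvRecSolveA fuel sum_digits count else count

def solution (n : Int) : Int :=
  if n < 10 then 0 else pvRecSolveA (n.toNat + 1) n 0

-- ===== PORT B =====
-- while n >= 10: n = digit sum; count += 1  (fuel = termination guard only)
def pvLoopB (fuel : Nat) (n count : Int) : Int :=
  match fuel with
  | 0 => count
  | fuel + 1 =>
    if n ≥ 10 then pvLoopB fuel (pvDigitSum n) (count + 1) else count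

def solution_alt (n : Int) : Int := pvLoopB (n.toNat + 1) n 0

-- ===== PRECONDITION & SPEC =====
def Spec_solution (n : Int) (out : Int) : Prop := out = solution_alt n
instance (n : Int) (out : Int) : Decidable (Spec_solution n out) := by unfold Spec_solution; infer_instance

-- ===== CLAIM (what is proved, stated in full; the proofs are below) =====
def Claim_equal_solution : Prop := ∀ (n : Int), Dom_solution n → Spec_solution n (solution n)

-- ===== LEMMAS AND PROOFS =====
theorem loopB_eq_recA (fuel : Nat) :
    ∀ n c : Int, 10 ≤ n → pvLoopB (fuel + 1) n c = pvRecSolveA (fuel + 1) n c := by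
  induction fuel with
  | zero =>
    intro n c hn
    simp only [pvLoopB, pvRecSolveA]
    rw [if_pos hn]
    by_cases h : pvDigitSum n > 9 <;> simp [pvLoopB, h]
  | succ g ih =>
    intro n c hn
    conv_lhs => rw [pvLoopB]
    rw [if_pos hn]
    conv_rhs => rw [pvRecSolveA]
    by_cases h : pvDigitSum n > 9
    · rw [if_pos h, ih _ _ (by omega)]
    · rw [if_neg h]
      have : ¬ pvDigitSum n ≥ 10 := by omega
      cases g <;> simp [pvLoopB, this]

-- ===== VERDICT (by name: the statement is the Claim_ definition above) =====
theorem solution_spec : Claim_equal_solution := by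
  intro n _
  unfold Spec_solution solution solution_alt
  by_cases h : n < 10
  · rw [if_pos h]
    cases hn : n.toNat + 1 with
    | zero => simp at hn
    | succ k => simp [pvLoopB, show ¬ n ≥ 10 by omega]
  · rw [if_neg h]
    cases hn : n.toNat + 1 with
    | zero => simp at hn
    | succ k => rw [loopB_eq_recA k n 0 (by omega)]
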